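-- pv_equiv track=rewrite | github.com/grapheneaffiliate/h4-polytopic-attention | solve_arc2_train_af.py | solve_ded97339
-- ===== SOURCE A (Python) =====
-- def solve_ded97339(grid):
--     """Pairs of 8s sharing row/col: connect all such pairs with lines of 8."""
--     rows, cols = len(grid), len(grid[0])
--     eights = []
--     for r in range(rows):
--         for c in range(cols):
--             if grid[r][c] == 8:
--                 eights.append((r, c))
--     out = [row[:] for row in grid]
--     # Connect all pairs sharing a row or column
--     for i in range(len(eights)):
--         for j in range(i+1, len(eights)):
--             r1, c1 = eights[i]
--             r2, c2 = eights[j]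
--             if r1 == r2:
--                 for c in range(min(c1,c2), max(c1,c2)+1):
--                     out[r1][c] = 8
--             elif c1 == c2:
--                 for r in range(min(r1,r2), max(r1,r2)+1):
--                     out[r][c1] = 8
--     return out
-- ===== SOURCE B (Python) =====
-- def solve_ded97339(grid):
--     """Pairs of 8s sharing row/col: connect all such pairs with lines of 8."""
--     rows, cols = len(grid), len(grid[0])
--     out = [row[:] for row in grid]
--     # One pass per row: fill from the leftmost to the rightmost 8 (if at least two)
--     for r in range(rows):
--         idx = [c for c in range(cols) if grid[r][c] == 8]
--         if len(idx) >= 2: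
--             for c in range(idx[0], idx[-1] + 1):
--                 out[r][c] = 8
--     # One pass per column: fill from the topmost to the bottommost 8 (if at least two)
--     for c in range(cols):
--         idx = [r for r in range(rows) if grid[r][c] == 8]
--         if len(idx) >= 2:
--             for r in range(idx[0], idx[-1] + 1):
--                 out[r][c] = 8
--     return out
-- ===== Notes on version B (the rewrite author's own statement) =====
-- stated objective: alternative
-- what changed: Instead of iterating over all pairs of 8-cells and re-filling a segment for every same-row/same-column pair, B makes one pass per row and per column, filling each span once from the leftmost/topmost 8 to the rightmost/bottommost 8.
import Mathlib
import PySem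

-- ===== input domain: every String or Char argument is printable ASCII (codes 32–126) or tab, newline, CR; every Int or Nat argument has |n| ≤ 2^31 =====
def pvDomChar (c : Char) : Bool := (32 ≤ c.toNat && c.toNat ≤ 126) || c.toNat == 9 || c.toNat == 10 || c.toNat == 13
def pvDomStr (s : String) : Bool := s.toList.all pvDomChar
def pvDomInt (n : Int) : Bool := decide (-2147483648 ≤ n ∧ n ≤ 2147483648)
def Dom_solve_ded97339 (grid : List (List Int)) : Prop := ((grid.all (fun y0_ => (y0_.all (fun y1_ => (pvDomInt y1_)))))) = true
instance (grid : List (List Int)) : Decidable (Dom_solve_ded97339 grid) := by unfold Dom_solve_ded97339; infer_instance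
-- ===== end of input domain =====

-- B replaces A's loop over all pairs of 8-cells by a single span fill per row and per
-- column (leftmost-to-rightmost 8, topmost-to-bottommost 8): a different algorithm, same result.

-- shared cell primitives (Python's grid[r][c] read and out[r][c] = 8 write, nonnegative in-range indices)
def pvGet (g : List (List Int)) (r c : Nat) : Int := (g.getD r []).getD c 0
def pvSet8 (g : List (List Int)) (r c : Nat) : List (List Int) := g.modify r (fun row => row.set c 8)

-- ===== PORT A =====
def solve_ded97339 (grid : List (List Int)) : List (List Int) :=
  let rows := grid.length
  let cols := (grid.headD []).length
  let eights : List (Nat × Nat) :=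
    (List.range rows).foldl (fun acc r =>
      (List.range cols).foldl (fun acc c =>
        if pvGet grid r c = 8 then acc ++ [(r, c)] else acc) acc) []
  let out := grid.map (fun row => row)
  (List.range eights.length).foldl (fun out i =>
    (List.range' (i + 1) (eights.length - (i + 1))).foldl (fun out j =>
      let p := eights.getD i (0, 0)
      let q := eights.getD j (0, 0)
      if p.1 = q.1 then
        (List.range' (min p.2 q.2) (max p.2 q.2 + 1 - min p.2 q.2)).foldl
          (fun out c => pvSet8 out p.1 c) out
      else if p.2 = q.2 then
        (List.range' (min p.1 q.1) (max p.1 q.1 + 1 - min p.1 q.1)).foldl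
          (fun out r => pvSet8 out r p.2) out
      else out) out) out

-- ===== PORT B =====
def solve_ded97339_alt (grid : List (List Int)) : List (List Int) :=
  let rows := grid.length
  let cols := (grid.headD []).length
  let out := grid.map (fun row => row)
  let out := (List.range rows).foldl (fun out r =>
    let idx := (List.range cols).filter (fun c => pvGet grid r c = 8)
    if 2 ≤ idx.length then
      (List.range' (idx.headD 0) (idx.getLastD 0 + 1 - idx.headD 0)).foldl
        (fun o c => pvSet8 o r c) out
    else out) out
  (List.range cols).foldl (fun out c =>
    let idx := (List.range rows).filter (fun r => pvGet grid r c = 8)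
    if 2 ≤ idx.length then
      (List.range' (idx.headD 0) (idx.getLastD 0 + 1 - idx.headD 0)).foldl
        (fun o r => pvSet8 o r c) out
    else out) out

-- ===== PRECONDITION & SPEC =====
-- Pre_ is exactly where the Python A returns: a nonempty grid whose every row has at least
-- len(grid[0]) entries (A's scan reads grid[r][c] for all c < len(grid[0]) and raises
-- IndexError on any shorter row; the empty grid raises IndexError on grid[0]).
def Pre_solve_ded97339 (grid : List (List Int)) : Prop :=
  0 < grid.length ∧ ∀ row ∈ grid, (grid.headD []).length ≤ row.length
instance (grid : List (List Int)) : Decidable (Pre_solve_ded97339 grid) := by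
  unfold Pre_solve_ded97339; infer_instance
def pvWitness_solve_ded97339 : List (List Int) := [[8, 0, 8], [0, 0, 0], [8, 0, 0]]

def Spec_solve_ded97339 (grid : List (List Int)) (out : List (List Int)) : Prop := out = solve_ded97339_alt grid
instance (grid : List (List Int)) (out : List (List Int)) : Decidable (Spec_solve_ded97339 grid out) := by unfold Spec_solve_ded97339; infer_instance

-- ===== CLAIM (what is proved, stated in full; the proofs are below) =====
def Claim_equal_solve_ded97339 : Prop := ∀ (grid : List (List Int)), Dom_solve_ded97339 grid → Pre_solve_ded97339 grid → Spec_solve_ded97339 grid (solve_ded97339 grid)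

-- ===== LEMMAS AND PROOFS =====

-- apply a batch of 8-writes
def applyW (g : List (List Int)) (ws : List (Nat × Nat)) : List (List Int) :=
  ws.foldl (fun g p => pvSet8 g p.1 p.2) g

theorem applyW_append (g : List (List Int)) (a b : List (Nat × Nat)) :
    applyW g (a ++ b) = applyW (applyW g a) b :=
  List.foldl_append

theorem foldl_eq_applyW {α : Type} (f : List (List Int) → α → List (List Int))
    (h : α → List (Nat × Nat)) (hf : ∀ o x, f o x = applyW o (h x)) :
    ∀ (l : List α) (g : List (List Int)), l.foldl f g = applyW g (l.flatMap h) := by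
  intro l
  induction l with
  | nil => intro g; rfl
  | cons x l ih =>
    intro g
    simp only [List.foldl_cons, List.flatMap_cons, applyW_append, ih, hf]

theorem span_foldl (r : Nat) (l : List Nat) (g : List (List Int)) :
    l.foldl (fun o c => pvSet8 o r c) g = applyW g (l.map (fun c => (r, c))) := by
  simp [applyW, List.foldl_map]

theorem span_foldl_col (c : Nat) (l : List Nat) (g : List (List Int)) :
    l.foldl (fun o r => pvSet8 o r c) g = applyW g (l.map (fun r => (r, c))) := by
  simp [applyW, List.foldl_map]

-- shape preservation
theorem length_pvSet8 (g : List (List Int)) (r c : Nat) : (pvSet8 g r c).length = g.length := by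
  simp [pvSet8]

theorem row_pvSet8 (g : List (List Int)) (a b r : Nat) :
    (pvSet8 g a b).getD r [] = if a = r ∧ r < g.length then (g.getD r []).set b 8 else g.getD r [] := by
  unfold pvSet8
  rcases Nat.lt_or_ge r g.length with h | h
  · have h' : r < (g.modify a (fun row => row.set b 8)).length := by simpa using h
    rw [List.getD_eq_getElem _ _ h', List.getD_eq_getElem _ _ h]
    have this1 := List.getElem?_modify (fun row => row.set b 8) a g r
    rw [List.getElem?_eq_getElem h, List.getElem?_eq_getElem h'] at this1
    by_cases har : a = r
    · simp only [har, if_pos rfl, Option.map_eq_map, Option.map_some] at this1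
      simp only [har, h, and_self, if_true]
      exact Option.some.inj this1
    · simp only [har, if_neg har, Option.map_eq_map, Option.map_some] at this1
      simp only [har, false_and, if_false]
      exact Option.some.inj this1
  · have h' : (g.modify a (fun row => row.set b 8)).length ≤ r := by simpa using h
    rw [List.getD_eq_default _ _ h', List.getD_eq_default _ _ h]
    simp [Nat.not_lt.mpr h]

theorem rowlen_pvSet8 (g : List (List Int)) (a b r : Nat) :
    ((pvSet8 g a b).getD r []).length = (g.getD r []).length := by
  rw [row_pvSet8]; split_ifs <;> simp

theorem length_applyW (g : List (List Int)) (ws : List (Nat × Nat)) :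
    (applyW g ws).length = g.length := by
  induction ws generalizing g with
  | nil => rfl
  | cons p ws ih => simp only [applyW, List.foldl_cons] at ih ⊢; rw [ih, length_pvSet8]

theorem rowlen_applyW (g : List (List Int)) (ws : List (Nat × Nat)) (r : Nat) :
    ((applyW g ws).getD r []).length = (g.getD r []).length := by
  induction ws generalizing g with
  | nil => rfl
  | cons p ws ih => simp only [applyW, List.foldl_cons] at ih ⊢; rw [ih, rowlen_pvSet8]

-- value of a single write
theorem pvGet_pvSet8 (g : List (List Int)) (a b r c : Nat)
    (ha : a < g.length) (hb : b < (g.getD a []).length) :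
    pvGet (pvSet8 g a b) r c = if a = r ∧ b = c then 8 else pvGet g r c := by
  unfold pvGet
  rw [row_pvSet8]
  by_cases har : a = r
  · subst har
    simp only [ha, and_true, if_pos rfl]
    rcases Nat.lt_or_ge c (g.getD a []).length with hc | hc
    · rw [List.getD_eq_getElem _ _ (by simpa using hc), List.getD_eq_getElem _ _ hc]
      by_cases hbc : b = c
      · subst hbc; simp [List.getElem_set, hb]
      · simp [List.getElem_set, hbc]
    · rw [List.getD_eq_default _ _ (by simpa using hc), List.getD_eq_default _ _ hc]
      have : ¬ (b = c) := by omega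
      simp [this]
  · simp [har]

def InR (g : List (List Int)) (p : Nat × Nat) : Prop :=
  p.1 < g.length ∧ p.2 < (g.getD p.1 []).length

theorem pvGet_applyW (ws : List (Nat × Nat)) (g : List (List Int))
    (hws : ∀ p ∈ ws, InR g p) (r c : Nat) :
    pvGet (applyW g ws) r c = if (r, c) ∈ ws then 8 else pvGet g r c := by
  induction ws generalizing g with
  | nil => rfl
  | cons p ws ih =>
    have hp := hws p List.mem_cons_self
    have hstep : applyW g (p :: ws) = applyW (pvSet8 g p.1 p.2) ws := rfl
    have hws' : ∀ q ∈ ws, InR (pvSet8 g p.1 p.2) q := by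
      intro q hq
      have := hws q (List.mem_cons_of_mem _ hq)
      constructor
      · rw [length_pvSet8]; exact this.1
      · rw [rowlen_pvSet8]; exact this.2
    rw [hstep, ih _ hws']
    by_cases hmem : (r, c) ∈ ws
    · simp [hmem]
    · have hone := pvGet_pvSet8 g p.1 p.2 r c hp.1 hp.2
      by_cases hpe : p = (r, c)
      · subst hpe; simp [hmem, hone]
      · have : ¬ (p.1 = r ∧ p.2 = c) := by
          intro ⟨h1, h2⟩; exact hpe (by cases p; simp_all)
        have hnot : ¬ ((r, c) ∈ p :: ws) := by
          rw [List.mem_cons]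
          rintro (h | h)
          · exact hpe h.symm
          · exact hmem h
        rw [if_neg hmem, hone, if_neg this, if_neg hnot]

-- the write lists of the two ports
def span (a b : Nat) : List Nat := List.range' (min a b) (max a b + 1 - min a b)

theorem mem_span (a b x : Nat) : x ∈ span a b ↔ min a b ≤ x ∧ x ≤ max a b := by
  simp only [span, List.mem_range']
  constructor
  · rintro ⟨i, hi, rfl⟩; omega
  · intro ⟨h1, h2⟩; exact ⟨x - min a b, by omega, by omega⟩

def pw (p q : Nat × Nat) : List (Nat × Nat) :=
  if p.1 = q.1 then (span p.2 q.2).map (fun c => (p.1, c))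
  else if p.2 = q.2 then (span p.1 q.1).map (fun r => (r, p.2))
  else []

def eightsOf (grid : List (List Int)) : List (Nat × Nat) :=
  (List.range grid.length).foldl (fun acc r =>
    (List.range (grid.headD []).length).foldl (fun acc c =>
      if pvGet grid r c = 8 then acc ++ [(r, c)] else acc) acc) []

def wsA (grid : List (List Int)) : List (Nat × Nat) :=
  let eights := eightsOf grid
  (List.range eights.length).flatMap (fun i =>
    (List.range' (i + 1) (eights.length - (i + 1))).flatMap (fun j =>
      pw (eights.getD i (0, 0)) (eights.getD j (0, 0))))

def idxRow (grid : List (List Int)) (r : Nat) : List Nat :=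
  (List.range (grid.headD []).length).filter (fun c => pvGet grid r c = 8)

def idxCol (grid : List (List Int)) (c : Nat) : List Nat :=
  (List.range grid.length).filter (fun r => pvGet grid r c = 8)

def wsB (grid : List (List Int)) : List (Nat × Nat) :=
  ((List.range grid.length).flatMap (fun r =>
    let idx := idxRow grid r
    if 2 ≤ idx.length then
      (List.range' (idx.headD 0) (idx.getLastD 0 + 1 - idx.headD 0)).map (fun c => (r, c))
    else []))
  ++ ((List.range (grid.headD []).length).flatMap (fun c =>
    let idx := idxCol grid c
    if 2 ≤ idx.length then
      (List.range' (idx.headD 0) (idx.getLastD 0 + 1 - idx.headD 0)).map (fun r => (r, c))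
    else []))

-- the ports compute applyW of their write lists
theorem portA_eq (grid : List (List Int)) :
    solve_ded97339 grid = applyW grid (wsA grid) := by
  unfold solve_ded97339 wsA eightsOf
  simp only [List.map_id']
  refine foldl_eq_applyW _ _ (fun o i => ?_) _ _
  refine foldl_eq_applyW _ _ (fun o' j => ?_) _ _
  unfold pw span
  split_ifs with h1 h2
  · rw [span_foldl]
  · rw [span_foldl_col]
  · rfl

theorem portB_eq (grid : List (List Int)) :
    solve_ded97339_alt grid = applyW grid (wsB grid) := by
  unfold solve_ded97339_alt wsB idxRow idxCol
  simp only [List.map_id']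
  rw [applyW_append]
  have hgen : ∀ (X Y : List (List Int)), X = Y → ∀ (l : List Nat)
      (f : List (List Int) → Nat → List (List Int)) (h : Nat → List (Nat × Nat)),
      (∀ o c, f o c = applyW o (h c)) → List.foldl f X l = applyW Y (l.flatMap h) := by
    intro X Y hXY l f h hfh
    subst hXY
    exact foldl_eq_applyW f h hfh l X
  refine hgen _ _ ?_ _ _ _ (fun o c => ?_)
  · refine foldl_eq_applyW _ _ (fun o r => ?_) _ _
    dsimp only
    split_ifs with h
    · rw [span_foldl]
    · rfl
  · dsimp only
    split_ifs with h
    · rw [span_foldl_col]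
    · rfl

-- characterisation of eightsOf
theorem foldl_append_ite_map {α β : Type} (p : α → Prop) [DecidablePred p] (f : α → β)
    (l : List α) : ∀ (acc : List β),
    l.foldl (fun acc x => if p x then acc ++ [f x] else acc) acc
      = acc ++ (l.filter (fun x => p x)).map f := by
  induction l with
  | nil => intro acc; simp
  | cons x l ih =>
    intro acc
    by_cases h : p x <;> simp [List.filter_cons, h, ih]

theorem eightsOf_spec (grid : List (List Int)) :
    eightsOf grid = (List.range grid.length).flatMap (fun r =>
      ((List.range (grid.headD []).length).filter (fun c => pvGet grid r c = 8)).map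
        (fun c => (r, c))) := by
  unfold eightsOf
  rw [PySem.List.foldl_congr_mem _ _
    (fun acc r => acc ++ ((List.range (grid.headD []).length).filter
        (fun c => pvGet grid r c = 8)).map (fun c => (r, c))) _
    (fun acc r _ => foldl_append_ite_map _ _ _ acc),
    PySem.List.foldl_append_eq_flatMap]
  simp

theorem mem_eightsOf (grid : List (List Int)) (a b : Nat) :
    (a, b) ∈ eightsOf grid ↔
      a < grid.length ∧ b < (grid.headD []).length ∧ pvGet grid a b = 8 := by
  rw [eightsOf_spec]
  simp only [List.mem_flatMap, List.mem_map, List.mem_filter, List.mem_range, Prod.mk.injEq,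
    decide_eq_true_eq]
  constructor
  · rintro ⟨r, hr, c, ⟨hc, h8⟩, rfl, rfl⟩
    exact ⟨hr, hc, h8⟩
  · rintro ⟨ha, hb, h8⟩
    exact ⟨a, ha, b, ⟨hb, h8⟩, rfl, rfl⟩

theorem nodup_eightsOf (grid : List (List Int)) : (eightsOf grid).Nodup := by
  rw [eightsOf_spec, List.nodup_flatMap]
  constructor
  · intro r _
    exact List.Nodup.map (fun a b h => by simpa using h)
      (List.Nodup.filter _ List.nodup_range)
  · refine List.Pairwise.imp ?_ List.pairwise_lt_range
    intro r1 r2 h12 x hx1 hx2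
    obtain ⟨c1, -, rfl⟩ := List.mem_map.mp hx1
    obtain ⟨c2, -, he⟩ := List.mem_map.mp hx2
    rw [Prod.mk.injEq] at he
    omega

-- painted predicate
def PaintedRow (grid : List (List Int)) (r c : Nat) : Prop :=
  ∃ c1 c2, c1 < c2 ∧ (r, c1) ∈ eightsOf grid ∧ (r, c2) ∈ eightsOf grid ∧ c1 ≤ c ∧ c ≤ c2

def PaintedCol (grid : List (List Int)) (r c : Nat) : Prop :=
  ∃ r1 r2, r1 < r2 ∧ (r1, c) ∈ eightsOf grid ∧ (r2, c) ∈ eightsOf grid ∧ r1 ≤ r ∧ r ≤ r2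

theorem mem_pw (p q : Nat × Nat) (r c : Nat) :
    (r, c) ∈ pw p q ↔
      (p.1 = q.1 ∧ r = p.1 ∧ min p.2 q.2 ≤ c ∧ c ≤ max p.2 q.2) ∨
      (¬ p.1 = q.1 ∧ p.2 = q.2 ∧ c = p.2 ∧ min p.1 q.1 ≤ r ∧ r ≤ max p.1 q.1) := by
  unfold pw
  split_ifs with h1 h2
  · simp only [List.mem_map, mem_span, Prod.mk.injEq, h1, not_true, false_and, or_false,
      true_and]
    constructor
    · rintro ⟨c', hc', rfl, rfl⟩
      exact ⟨rfl, hc'.1, hc'.2⟩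
    · rintro ⟨rfl, hc1, hc2⟩
      exact ⟨c, ⟨hc1, hc2⟩, rfl, rfl⟩
  · simp only [List.mem_map, mem_span, Prod.mk.injEq, h1, h2, not_false_iff, false_and,
      false_or, true_and]
    constructor
    · rintro ⟨r', hr', rfl, rfl⟩
      exact ⟨rfl, hr'.1, hr'.2⟩
    · rintro ⟨rfl, hr1, hr2⟩
      exact ⟨r, ⟨hr1, hr2⟩, rfl, rfl⟩
  · simp [h1, h2]

theorem mem_wsA (grid : List (List Int)) (r c : Nat) :
    (r, c) ∈ wsA grid ↔ PaintedRow grid r c ∨ PaintedCol grid r c := by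
  unfold wsA PaintedRow PaintedCol
  simp only [List.mem_flatMap, List.mem_range, List.mem_range'_1]
  constructor
  · rintro ⟨i, hi, j, ⟨hij, hj⟩, hmem⟩
    have hj' : j < (eightsOf grid).length := by omega
    rw [List.getD_eq_getElem _ _ hi, List.getD_eq_getElem _ _ hj', mem_pw] at hmem
    have hne : (eightsOf grid)[i] ≠ (eightsOf grid)[j] := by
      intro h
      have := ((nodup_eightsOf grid).getElem_inj_iff).mp h
      omega
    have hmi : ((eightsOf grid)[i].1, (eightsOf grid)[i].2) ∈ eightsOf grid := by
      simpa using List.getElem_mem hi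
    have hmj : ((eightsOf grid)[j].1, (eightsOf grid)[j].2) ∈ eightsOf grid := by
      simpa using List.getElem_mem hj'
    rcases hmem with ⟨h1, hr, hc1, hc2⟩ | ⟨h1, h2, hc, hr1, hr2⟩
    · left
      have hne2 : (eightsOf grid)[i].2 ≠ (eightsOf grid)[j].2 := by
        intro h2
        exact hne (Prod.ext_iff.mpr ⟨h1, h2⟩)
      rcases Nat.le_total (eightsOf grid)[i].2 (eightsOf grid)[j].2 with hle | hle
      · refine ⟨(eightsOf grid)[i].2, (eightsOf grid)[j].2, by omega, ?_, ?_, by omega, by omega⟩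
        · rw [hr]; exact hmi
        · rw [hr, h1]; exact hmj
      · refine ⟨(eightsOf grid)[j].2, (eightsOf grid)[i].2, by omega, ?_, ?_, by omega, by omega⟩
        · rw [hr, h1]; exact hmj
        · rw [hr]; exact hmi
    · right
      rcases Nat.le_total (eightsOf grid)[i].1 (eightsOf grid)[j].1 with hle | hle
      · refine ⟨(eightsOf grid)[i].1, (eightsOf grid)[j].1, by omega, ?_, ?_, by omega, by omega⟩
        · rw [hc]; exact hmi
        · rw [hc, h2]; exact hmj
      · refine ⟨(eightsOf grid)[j].1, (eightsOf grid)[i].1, by omega, ?_, ?_, by omega, by omega⟩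
        · rw [hc, h2]; exact hmj
        · rw [hc]; exact hmi
  · rintro (⟨c1, c2, hlt, hm1, hm2, hle1, hle2⟩ | ⟨r1, r2, hlt, hm1, hm2, hle1, hle2⟩)
    · obtain ⟨i0, hi0, hEi⟩ := List.mem_iff_getElem.mp hm1
      obtain ⟨j0, hj0, hEj⟩ := List.mem_iff_getElem.mp hm2
      have hne : i0 ≠ j0 := by
        intro h
        subst h
        rw [hEi] at hEj
        simp at hEj
        omega
      rcases Nat.lt_or_ge i0 j0 with h | h
      · refine ⟨i0, hi0, j0, ⟨by omega, by omega⟩, ?_⟩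
        rw [List.getD_eq_getElem _ _ hi0, List.getD_eq_getElem _ _ hj0, hEi, hEj, mem_pw]
        left
        exact ⟨rfl, rfl, by omega, by omega⟩
      · refine ⟨j0, hj0, i0, ⟨by omega, by omega⟩, ?_⟩
        rw [List.getD_eq_getElem _ _ hj0, List.getD_eq_getElem _ _ hi0, hEi, hEj, mem_pw]
        left
        exact ⟨rfl, rfl, by omega, by omega⟩
    · obtain ⟨i0, hi0, hEi⟩ := List.mem_iff_getElem.mp hm1
      obtain ⟨j0, hj0, hEj⟩ := List.mem_iff_getElem.mp hm2
      have hne : i0 ≠ j0 := by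
        intro h
        subst h
        rw [hEi] at hEj
        simp at hEj
        omega
      rcases Nat.lt_or_ge i0 j0 with h | h
      · refine ⟨i0, hi0, j0, ⟨by omega, by omega⟩, ?_⟩
        rw [List.getD_eq_getElem _ _ hi0, List.getD_eq_getElem _ _ hj0, hEi, hEj, mem_pw]
        right
        exact ⟨by omega, rfl, rfl, by omega, by omega⟩
      · refine ⟨j0, hj0, i0, ⟨by omega, by omega⟩, ?_⟩
        rw [List.getD_eq_getElem _ _ hj0, List.getD_eq_getElem _ _ hi0, hEi, hEj, mem_pw]
        right
        exact ⟨by omega, rfl, rfl, by omega, by omega⟩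

theorem mem_idxRow (grid : List (List Int)) (r c' : Nat) :
    c' ∈ idxRow grid r ↔ c' < (grid.headD []).length ∧ pvGet grid r c' = 8 := by
  simp [idxRow, List.mem_filter, List.mem_range]

theorem mem_idxCol (grid : List (List Int)) (c r' : Nat) :
    r' ∈ idxCol grid c ↔ r' < grid.length ∧ pvGet grid r' c = 8 := by
  simp [idxCol, List.mem_filter, List.mem_range]

theorem sorted_idxRow (grid : List (List Int)) (r : Nat) :
    (idxRow grid r).Pairwise (· < ·) :=
  List.Pairwise.filter _ List.pairwise_lt_range

theorem sorted_idxCol (grid : List (List Int)) (c : Nat) :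
    (idxCol grid c).Pairwise (· < ·) :=
  List.Pairwise.filter _ List.pairwise_lt_range

theorem sorted_mono (idx : List Nat) (hs : idx.Pairwise (· < ·)) :
    ∀ i j (_ : i < idx.length) (_ : j < idx.length), i ≤ j → idx[i] ≤ idx[j] := by
  intro i j hi hj hij
  rcases Nat.eq_or_lt_of_le hij with rfl | h
  · exact le_refl _
  · exact Nat.le_of_lt (List.pairwise_iff_getElem.mp hs i j hi hj h)

theorem headD_getElem (idx : List Nat) (h0 : 0 < idx.length) : idx.headD 0 = idx[0] := by
  rw [List.headD_eq_head?, List.head?_eq_getElem?, List.getElem?_eq_getElem h0]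
  rfl

theorem getLastD_getElem (idx : List Nat) (h0 : 0 < idx.length) :
    idx.getLastD 0 = idx[idx.length - 1] := by
  rw [List.getLastD_eq_getLast?, List.getLast?_eq_getElem?,
    List.getElem?_eq_getElem (by omega)]
  rfl

theorem span_mem_iff (idx : List Nat) (hs : idx.Pairwise (· < ·)) (x : Nat) :
    (2 ≤ idx.length ∧ idx.headD 0 ≤ x ∧ x ≤ idx.getLastD 0) ↔
      ∃ a b, a < b ∧ a ∈ idx ∧ b ∈ idx ∧ a ≤ x ∧ x ≤ b := by
  constructor
  · rintro ⟨hlen, h1, h2⟩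
    have h0 : 0 < idx.length := by omega
    rw [headD_getElem _ h0] at h1
    rw [getLastD_getElem _ h0] at h2
    exact ⟨idx[0], idx[idx.length - 1],
      List.pairwise_iff_getElem.mp hs 0 (idx.length - 1) h0 (by omega) (by omega),
      List.getElem_mem _, List.getElem_mem _, h1, h2⟩
  · rintro ⟨a, b, hab, ha, hb, hax, hxb⟩
    obtain ⟨ia, hia, hia'⟩ := List.mem_iff_getElem.mp ha
    obtain ⟨ib, hib, hib'⟩ := List.mem_iff_getElem.mp hb
    have hne : ia ≠ ib := by
      intro h
      subst h
      rw [hia'] at hib'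
      omega
    have hlen : 2 ≤ idx.length := by omega
    have h0 : 0 < idx.length := by omega
    refine ⟨hlen, ?_, ?_⟩
    · rw [headD_getElem _ h0]
      have := sorted_mono idx hs 0 ia h0 hia (by omega)
      omega
    · rw [getLastD_getElem _ h0]
      have := sorted_mono idx hs ib (idx.length - 1) hib (by omega) (by omega)
      omega

theorem mem_wsB (grid : List (List Int)) (r c : Nat) :
    (r, c) ∈ wsB grid ↔ PaintedRow grid r c ∨ PaintedCol grid r c := by
  unfold wsB PaintedRow PaintedCol
  rw [List.mem_append]
  refine or_congr ?_ ?_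
  · simp only [List.mem_flatMap, List.mem_range]
    constructor
    · rintro ⟨r', hr', hmem⟩
      by_cases h : 2 ≤ (idxRow grid r').length
      swap
      · rw [if_neg h] at hmem; simp at hmem
      rw [if_pos h] at hmem
      obtain ⟨c', hc', he⟩ := List.mem_map.mp hmem
      rw [Prod.mk.injEq] at he
      obtain ⟨rfl, rfl⟩ := he
      rw [List.mem_range'_1] at hc'
      have hsp := (span_mem_iff (idxRow grid r') (sorted_idxRow grid r') c').mp
        ⟨h, hc'.1, by omega⟩
      obtain ⟨a, b, hab, ha, hb, hax, hxb⟩ := hsp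
      rw [mem_idxRow] at ha hb
      exact ⟨a, b, hab, (mem_eightsOf _ _ _).mpr ⟨hr', ha.1, ha.2⟩,
        (mem_eightsOf _ _ _).mpr ⟨hr', hb.1, hb.2⟩, hax, hxb⟩
    · rintro ⟨c1, c2, hlt, hm1, hm2, hle1, hle2⟩
      rw [mem_eightsOf] at hm1 hm2
      have ha : c1 ∈ idxRow grid r := (mem_idxRow _ _ _).mpr ⟨hm1.2.1, hm1.2.2⟩
      have hb : c2 ∈ idxRow grid r := (mem_idxRow _ _ _).mpr ⟨hm2.2.1, hm2.2.2⟩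
      have hsp := (span_mem_iff (idxRow grid r) (sorted_idxRow grid r) c).mpr
        ⟨c1, c2, hlt, ha, hb, hle1, hle2⟩
      refine ⟨r, hm1.1, ?_⟩
      rw [if_pos hsp.1]
      exact List.mem_map.mpr ⟨c, List.mem_range'_1.mpr ⟨hsp.2.1, by omega⟩, rfl⟩
  · simp only [List.mem_flatMap, List.mem_range]
    constructor
    · rintro ⟨c', hc'', hmem⟩
      by_cases h : 2 ≤ (idxCol grid c').length
      swap
      · rw [if_neg h] at hmem; simp at hmem
      rw [if_pos h] at hmem
      obtain ⟨r', hr', he⟩ := List.mem_map.mp hmem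
      rw [Prod.mk.injEq] at he
      obtain ⟨rfl, rfl⟩ := he
      rw [List.mem_range'_1] at hr'
      have hsp := (span_mem_iff (idxCol grid c') (sorted_idxCol grid c') r').mp
        ⟨h, hr'.1, by omega⟩
      obtain ⟨a, b, hab, ha, hb, hax, hxb⟩ := hsp
      rw [mem_idxCol] at ha hb
      exact ⟨a, b, hab, (mem_eightsOf _ _ _).mpr ⟨ha.1, hc'', ha.2⟩,
        (mem_eightsOf _ _ _).mpr ⟨hb.1, hc'', hb.2⟩, hax, hxb⟩
    · rintro ⟨r1, r2, hlt, hm1, hm2, hle1, hle2⟩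
      rw [mem_eightsOf] at hm1 hm2
      have ha : r1 ∈ idxCol grid c := (mem_idxCol _ _ _).mpr ⟨hm1.1, hm1.2.2⟩
      have hb : r2 ∈ idxCol grid c := (mem_idxCol _ _ _).mpr ⟨hm2.1, hm2.2.2⟩
      have hsp := (span_mem_iff (idxCol grid c) (sorted_idxCol grid c) r).mpr
        ⟨r1, r2, hlt, ha, hb, hle1, hle2⟩
      refine ⟨c, hm1.2.1, ?_⟩
      rw [if_pos hsp.1]
      exact List.mem_map.mpr ⟨r, List.mem_range'_1.mpr ⟨hsp.2.1, by omega⟩, rfl⟩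

theorem painted_inR (grid : List (List Int)) (r c : Nat)
    (hpre : Pre_solve_ded97339 grid)
    (h : PaintedRow grid r c ∨ PaintedCol grid r c) : InR grid (r, c) := by
  obtain ⟨-, hpre⟩ := hpre
  have hrow : ∀ r', r' < grid.length → (grid.headD []).length ≤ (grid.getD r' []).length := by
    intro r' hr'
    rw [List.getD_eq_getElem _ _ hr']
    exact hpre _ (List.getElem_mem hr')
  rcases h with ⟨c1, c2, hlt, hm1, hm2, hle1, hle2⟩ | ⟨r1, r2, hlt, hm1, hm2, hle1, hle2⟩
  · rw [mem_eightsOf] at hm1 hm2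
    refine ⟨hm1.1, ?_⟩
    have := hrow r hm1.1
    have := hm2.2.1
    simp only []
    omega
  · rw [mem_eightsOf] at hm1 hm2
    have hr : r < grid.length := by
      have := hm2.1
      omega
    refine ⟨hr, ?_⟩
    have := hrow r hr
    have := hm1.2.1
    simp only []
    omega

theorem grid_ext (g1 g2 : List (List Int)) (hlen : g1.length = g2.length)
    (hrow : ∀ r, (g1.getD r []).length = (g2.getD r []).length)
    (hget : ∀ r c, pvGet g1 r c = pvGet g2 r c) : g1 = g2 := by
  apply List.ext_getElem hlen
  intro r h1 h2
  apply List.ext_getElem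
  · have := hrow r
    rwa [List.getD_eq_getElem _ _ h1, List.getD_eq_getElem _ _ h2] at this
  · intro c hc1 hc2
    have := hget r c
    unfold pvGet at this
    rwa [List.getD_eq_getElem _ _ h1, List.getD_eq_getElem _ _ h2,
      List.getD_eq_getElem _ _ hc1, List.getD_eq_getElem _ _ hc2] at this

-- ===== VERDICT (by name: the statement is the Claim_ definition above) =====
theorem solve_ded97339_spec : Claim_equal_solve_ded97339 := by
  intro grid _hdom hpre
  unfold Spec_solve_ded97339
  rw [portA_eq, portB_eq]
  have hInA : ∀ p ∈ wsA grid, InR grid p := by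
    intro p hp
    obtain ⟨r, c⟩ := p
    exact painted_inR grid r c hpre ((mem_wsA grid r c).mp hp)
  have hInB : ∀ p ∈ wsB grid, InR grid p := by
    intro p hp
    obtain ⟨r, c⟩ := p
    exact painted_inR grid r c hpre ((mem_wsB grid r c).mp hp)
  apply grid_ext
  · rw [length_applyW, length_applyW]
  · intro r; rw [rowlen_applyW, rowlen_applyW]
  · intro r c
    rw [pvGet_applyW _ _ hInA, pvGet_applyW _ _ hInB]
    by_cases hm : PaintedRow grid r c ∨ PaintedCol grid r c
    · rw [if_pos ((mem_wsA grid r c).mpr hm), if_pos ((mem_wsB grid r c).mpr hm)]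
    · rw [if_neg (fun h => hm ((mem_wsA grid r c).mp h)),
        if_neg (fun h => hm ((mem_wsB grid r c).mp h))]
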